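-- pv_equiv track=rewrite | github.com/miliar/Code_Jam_Webscraper | solutions_python/Problem_200/2204.py | ascend
-- ===== SOURCE A (Python) =====
-- def ascend(digits, i):
--     if i == len(digits):
--         return (9, i)
--     if i > 0 and digits[i] < digits[i-1]:
--         olddigit = digits[i]
--         digits[i] = 9
--         return (olddigit, i)
--     else:
--         num, j = ascend(digits, i+1)
--         if j == i+1 and num < digits[i]:
--             digits[i] -= 1
--             return (digits[i], i)
--         else:
--             return (9, j)
-- ===== SOURCE B (Python) =====
-- def ascend(digits, i):
--     n = len(digits)
--     num, j = 9, n
--     for p in range(max(i, 1), n):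
--         if digits[p] < digits[p - 1]:
--             num, j = digits[p], p
--             digits[p] = 9
--             break
--     for k in range(j - 1, i - 1, -1):
--         if j == k + 1 and num < digits[k]:
--             digits[k] -= 1
--             num, j = digits[k], k
--         else:
--             return (9, j)
--     return (num, j)
-- ===== Notes on version B (the rewrite author's own statement) =====
-- stated objective: simpler
-- what changed: Replaces A's recursive descent-then-unwind (one stack frame per index from i to the end of the list) by two flat loops: a forward scan for the first descent position, then an iterative leftward borrow chain; no recursion and no call stack.
-- outside the precondition, e.g. on ascend([1, 2], -3): A returns (9, 2), B returns (9, 2)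
import Mathlib
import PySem

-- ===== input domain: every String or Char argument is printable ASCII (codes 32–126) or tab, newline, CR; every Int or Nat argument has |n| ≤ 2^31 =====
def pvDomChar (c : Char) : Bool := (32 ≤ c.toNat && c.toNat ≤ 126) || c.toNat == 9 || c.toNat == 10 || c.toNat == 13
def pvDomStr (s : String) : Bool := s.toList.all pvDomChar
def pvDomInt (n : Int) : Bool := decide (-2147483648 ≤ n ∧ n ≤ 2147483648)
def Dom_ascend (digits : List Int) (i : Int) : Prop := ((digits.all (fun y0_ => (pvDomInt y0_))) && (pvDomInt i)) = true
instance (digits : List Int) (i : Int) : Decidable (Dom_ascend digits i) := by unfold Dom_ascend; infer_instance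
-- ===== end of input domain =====

-- B replaces A's recursive descent-then-unwind by one forward scan for the first descent
-- followed by one iterative leftward borrow chain (objective: simpler / non-recursive).
-- Both Pythons mutate `digits` in place identically; the ports thread that list state and
-- the equivalence proved here is about the RETURN value.

-- ===== PORT A =====
-- literal transliteration of A's recursion, threading the mutated list; fuel
-- (length - i) makes it structural: inside Pre_ it runs out exactly at i == len(digits)
def ascendAuxA (digits : List Int) (i : Int) : Nat → List Int × (Int × Int)
  | 0 => (digits, (9, i))
  | fuel + 1 =>
    if i = (digits.length : Int) then (digits, (9, i))
    else if i > 0 && decide (PySem.List.pyGetD digits i 0 < PySem.List.pyGetD digits (i - 1) 0) then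
      (PySem.List.pySetD digits i 9, (PySem.List.pyGetD digits i 0, i))
    else
      let sr := ascendAuxA digits (i + 1) fuel
      if sr.2.2 == i + 1 && decide (sr.2.1 < PySem.List.pyGetD sr.1 i 0) then
        (PySem.List.pySetD sr.1 i (PySem.List.pyGetD sr.1 i 0 - 1),
          (PySem.List.pyGetD sr.1 i 0 - 1, i))
      else (sr.1, (9, sr.2.2))

def ascend (digits : List Int) (i : Int) : Int × Int :=
  (ascendAuxA digits i ((digits.length : Int) - i).toNat).2

-- ===== PORT B =====
-- the second loop of Source B: for k in range(j-1, i-1, -1) with its early return,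
-- threading the mutated list
def ascendChainB : List Int → List Int → Int → Int → List Int × (Int × Int)
  | [], digits, num, j => (digits, (num, j))
  | k :: ks, digits, num, j =>
    if j == k + 1 && decide (num < PySem.List.pyGetD digits k 0) then
      ascendChainB ks (PySem.List.pySetD digits k (PySem.List.pyGetD digits k 0 - 1))
        (PySem.List.pyGetD digits k 0 - 1) k
    else (digits, (9, j))

def ascend_alt (digits : List Int) (i : Int) : Int × Int :=
  let n : Int := digits.length
  let s : List Int × Int × Int :=
    match (PySem.List.pyRange (max i 1) n 1).find?
        (fun p => decide (PySem.List.pyGetD digits p 0 < PySem.List.pyGetD digits (p - 1) 0)) with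
    | some p => (PySem.List.pySetD digits p 9, PySem.List.pyGetD digits p 0, p)
    | none => (digits, 9, n)
  (ascendChainB (PySem.List.pyRange (s.2.2 - 1) (i - 1) (-1)) s.1 s.2.1 s.2.2).2

-- ===== PRECONDITION & SPEC =====
-- Pre_ excludes i > len(digits), where A raises IndexError, and i < -len(digits), where A
-- raises IndexError or RecursionError except when an early (9, j) merely propagates down.
def Pre_ascend (digits : List Int) (i : Int) : Prop :=
  -(digits.length : Int) ≤ i ∧ i ≤ (digits.length : Int)
instance (digits : List Int) (i : Int) : Decidable (Pre_ascend digits i) := by unfold Pre_ascend; infer_instance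

def pvWitness_ascend : List Int × Int := ([1, 3, 2, 2, 1], 0)

def Spec_ascend (digits : List Int) (i : Int) (out : Int × Int) : Prop := out = ascend_alt digits i
instance (digits : List Int) (i : Int) (out : Int × Int) : Decidable (Spec_ascend digits i out) := by unfold Spec_ascend; infer_instance

-- ===== CLAIM (what is proved, stated in full; the proofs are below) =====
def Claim_equal_ascend : Prop := ∀ (digits : List Int) (i : Int), Dom_ascend digits i → Pre_ascend digits i → Spec_ascend digits i (ascend digits i)

-- ===== LEMMAS AND PROOFS =====

-- A's unwind step at level t, as a function of the recursive call's (state, value) result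
def combineStepS (t : Int) (sr : List Int × (Int × Int)) : List Int × (Int × Int) :=
  if sr.2.2 == t + 1 && decide (sr.2.1 < PySem.List.pyGetD sr.1 t 0) then
    (PySem.List.pySetD sr.1 t (PySem.List.pyGetD sr.1 t 0 - 1),
      (PySem.List.pyGetD sr.1 t 0 - 1, t))
  else (sr.1, (9, sr.2.2))

-- B's (state, value) result as a function of the forward scan's outcome
def altOfS (digits : List Int) (i : Int) (o : Option Int) : List Int × (Int × Int) :=
  let s : List Int × Int × Int :=
    match o with
    | some p => (PySem.List.pySetD digits p 9, PySem.List.pyGetD digits p 0, p)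
    | none => (digits, 9, (digits.length : Int))
  ascendChainB (PySem.List.pyRange (s.2.2 - 1) (i - 1) (-1)) s.1 s.2.1 s.2.2

-- extending the borrow chain downwards by its last element t combines exactly like
-- A's unwind step at t
lemma ascendChainB_step (t : Int) :
    ∀ (k : Nat) (s : Int), ∀ (st : List Int) (num : Int), s = t + (k : Int) →
      ascendChainB (PySem.List.pyRange s (t - 1) (-1)) st num (s + 1) =
        combineStepS t (ascendChainB (PySem.List.pyRange s t (-1)) st num (s + 1)) := by
  intro k
  induction k with
  | zero =>
    intro s st num hs
    rw [show s = t from by omega]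
    rw [PySem.List.pyRange_neg_one_cons (by omega : t - 1 < t),
        PySem.List.pyRange_neg_one_eq_nil (le_refl (t - 1)),
        PySem.List.pyRange_neg_one_eq_nil (le_refl t)]
    simp [ascendChainB, combineStepS]
  | succ m ihm =>
    intro s st num hs
    rw [PySem.List.pyRange_neg_one_cons (by omega : t - 1 < s),
        PySem.List.pyRange_neg_one_cons (by omega : t < s)]
    simp only [ascendChainB]
    by_cases h : num < PySem.List.pyGetD st s 0
    · rw [if_pos (by simp [h]), if_pos (by simp [h])]
      have hrec := ihm (s - 1)
        (PySem.List.pySetD st s (PySem.List.pyGetD st s 0 - 1))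
        (PySem.List.pyGetD st s 0 - 1) (by omega)
      rw [show s - 1 + 1 = s from by ring] at hrec
      exact hrec
    · rw [if_neg (by simp [h]), if_neg (by simp [h])]
      simp only [combineStepS]
      have hne : ((s + 1 : Int) == t + 1) = false := by
        rw [beq_eq_false_iff_ne]
        intro hc; omega
      simp [hne]

-- A's unwind step applied to B's (state, value) at i+1 is B's at i (same scan outcome o)
lemma combine_alt (digits : List Int) (i : Int) (hlt : i < (digits.length : Int))
    (o : Option Int) (ho : ∀ p, o = some p → i + 1 ≤ p) :
    combineStepS i (altOfS digits (i + 1) o) = altOfS digits i o := by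
  cases o with
  | none =>
    simp only [altOfS]
    rw [show i + 1 - 1 = i from by ring]
    have hstep := ascendChainB_step i ((digits.length : Int) - 1 - i).toNat
      ((digits.length : Int) - 1) digits 9 (by omega)
    rw [show (digits.length : Int) - 1 + 1 = (digits.length : Int) from by ring] at hstep
    exact hstep.symm
  | some p =>
    have hp : i + 1 ≤ p := ho p rfl
    simp only [altOfS]
    rw [show i + 1 - 1 = i from by ring]
    have hstep := ascendChainB_step i (p - 1 - i).toNat (p - 1)
      (PySem.List.pySetD digits p 9) (PySem.List.pyGetD digits p 0) (by omega)
    rw [show p - 1 + 1 = p from by ring] at hstep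
    exact hstep.symm

-- when there is no descent at i, dropping i from the scan range changes nothing
lemma find_shift (digits : List Int) (i n : Int) (hn : i < n)
    (hno : (decide (i > 0) && decide (PySem.List.pyGetD digits i 0 < PySem.List.pyGetD digits (i - 1) 0)) = false) :
    (PySem.List.pyRange (max i 1) n 1).find?
        (fun p => decide (PySem.List.pyGetD digits p 0 < PySem.List.pyGetD digits (p - 1) 0)) =
      (PySem.List.pyRange (max (i + 1) 1) n 1).find?
        (fun p => decide (PySem.List.pyGetD digits p 0 < PySem.List.pyGetD digits (p - 1) 0)) := by
  by_cases h : i ≤ 0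
  · have h1 : max i 1 = 1 := by omega
    have h2 : max (i + 1) 1 = 1 := by omega
    rw [h1, h2]
  · have hm : max i 1 = i := by omega
    have hm2 : max (i + 1) 1 = i + 1 := by omega
    have hpi : (fun p => decide (PySem.List.pyGetD digits p 0 < PySem.List.pyGetD digits (p - 1) 0)) i = false := by
      have hgt : decide (i > 0) = true := by simp; omega
      rw [hgt, Bool.true_and] at hno
      simpa using hno
    rw [hm, hm2, PySem.List.pyRange_one_cons hn, List.find?_cons_of_neg (by simp [hpi])]

-- main induction: A's recursion from i equals B's scan-then-chain, state and value alike
lemma ascend_main (digits : List Int) :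
    ∀ (fuel : Nat) (i : Int), i + fuel = (digits.length : Int) →
      ascendAuxA digits i fuel = altOfS digits i
        ((PySem.List.pyRange (max i 1) (digits.length : Int) 1).find?
          (fun p => decide (PySem.List.pyGetD digits p 0 < PySem.List.pyGetD digits (p - 1) 0))) := by
  intro fuel
  induction fuel with
  | zero =>
    intro i hlen
    have hi : i = (digits.length : Int) := by omega
    simp only [ascendAuxA, altOfS]
    rw [PySem.List.pyRange_one_eq_nil (by omega : (digits.length : Int) ≤ max i 1)]
    simp only [List.find?_nil]
    rw [PySem.List.pyRange_neg_one_eq_nil (by omega : (digits.length : Int) - 1 ≤ i - 1)]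
    simp [ascendChainB, hi]
  | succ m ih =>
    intro i hlen
    have hlt : i < (digits.length : Int) := by omega
    simp only [ascendAuxA]
    rw [if_neg (by omega : ¬ i = (digits.length : Int))]
    by_cases hd : (decide (i > 0) && decide (PySem.List.pyGetD digits i 0 < PySem.List.pyGetD digits (i - 1) 0)) = true
    · -- descent at i: both produce state digits[i]:=9 and value (digits[i], i)
      rw [if_pos hd]
      have hi1 : (1 : Int) ≤ i := by
        rcases Bool.and_eq_true_iff.mp hd with ⟨h1, _⟩
        simp at h1; omega
      rcases Bool.and_eq_true_iff.mp hd with ⟨_, h2⟩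
      simp only [altOfS]
      rw [show max i 1 = i from by omega, PySem.List.pyRange_one_cons hlt,
          List.find?_cons_of_pos (by simpa using h2)]
      rw [PySem.List.pyRange_neg_one_eq_nil (le_refl (i - 1))]
      simp [ascendChainB]
    · -- no descent at i: A recurses; rewrite via IH at i+1 and combine_alt
      rw [if_neg hd]
      rw [ih (i + 1) (by omega)]
      have hno : (decide (i > 0) && decide (PySem.List.pyGetD digits i 0 < PySem.List.pyGetD digits (i - 1) 0)) = false :=
        by simpa using hd
      show combineStepS i (altOfS digits (i + 1)
          ((PySem.List.pyRange (max (i + 1) 1) (digits.length : Int) 1).find?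
            (fun p => decide (PySem.List.pyGetD digits p 0 < PySem.List.pyGetD digits (p - 1) 0)))) =
        altOfS digits i _
      rw [find_shift digits i (digits.length : Int) hlt hno]
      refine combine_alt digits i hlt _ (fun p hp => ?_)
      have hmem := List.mem_of_find?_eq_some hp
      by_cases hio : i ≤ 0
      · have : max (i + 1) 1 = 1 := by omega
        rw [this] at hmem
        have := (PySem.List.mem_pyRange_one.mp hmem).1
        omega
      · rw [show max (i + 1) 1 = i + 1 from by omega] at hmem
        exact (PySem.List.mem_pyRange_one.mp hmem).1

-- ===== VERDICT (by name: the statement is the Claim_ definition above) =====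
theorem ascend_spec : Claim_equal_ascend := by
  intro digits i _ hpre
  unfold Spec_ascend ascend ascend_alt
  rw [ascend_main digits ((digits.length : Int) - i).toNat i (by have := hpre.2; omega)]
  rfl
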